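-- pv_equiv track=rewrite | github.com/ashrafamad77/memo | server/neo4j_repo.py | _journal_explore_links_from_rows
-- ===== SOURCE A (Python) =====
-- from typing import Any, ClassVar, Dict, List, Optional, Tuple
--
-- def _journal_explore_links_from_rows(rows: List[Dict[str, Any]]) -> List[Dict[str, Any]]:
--     """Deduplicate journal P67 rows; prefer direct links over people/places reached only via an activity."""
--     by_ref: Dict[str, Dict[str, Any]] = {}
--     for r in rows:
--         er = str(r.get("explore_ref") or "").strip()
--         if not er:
--             continue
--         src = str(r.get("src") or "")
--         prev = by_ref.get(er)
--         if prev is None: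
--             by_ref[er] = r
--             continue
--         prev_src = str(prev.get("src") or "")
--         if prev_src != "direct" and src == "direct":
--             by_ref[er] = r
--     order = {"person": 0, "situation": 1, "place": 2, "idea": 3, "group": 4, "tag": 5, "day": 6, "other": 7}
--     out = list(by_ref.values())
--     out.sort(
--         key=lambda x: (
--             order.get(str(x.get("bucket") or ""), 99),
--             str(x.get("display_name") or ""),
--         )
--     )
--     return [
--         {
--             "ref": str(x.get("explore_ref") or ""),
--             "name": (str(x.get("display_name") or "").strip() or str(x.get("explore_ref"))),
--             "bucket": str(x.get("bucket") or "other"),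
--             "ref_type": str(x.get("ref_type") or ""),
--             "source": str(x.get("src") or ""),
--         }
--         for x in out
--     ]
-- ===== SOURCE B (Python) =====
-- from typing import Any, Dict, List
--
--
-- def _journal_explore_links_from_rows(rows: List[Dict[str, Any]]) -> List[Dict[str, Any]]:
--     """Two staged passes instead of a greedy overwrite loop: record the first row and
--     the first 'direct' row per stripped ref via setdefault, pick the representative,
--     then emit by bucket rank (counting sort) with a per-bucket sort on display_name."""
--     first_seen: Dict[str, Dict[str, Any]] = {}
--     direct_row: Dict[str, Dict[str, Any]] = {}
--     for r in rows:
--         er = str(r.get("explore_ref") or "").strip()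
--         if er:
--             first_seen.setdefault(er, r)
--             if str(r.get("src") or "") == "direct":
--                 direct_row.setdefault(er, r)
--
--     reps = [direct_row.get(er, row) for er, row in first_seen.items()]
--
--     order = {"person": 0, "situation": 1, "place": 2, "idea": 3, "group": 4, "tag": 5, "day": 6, "other": 7}
--     out: List[Dict[str, Any]] = []
--     for rank in (0, 1, 2, 3, 4, 5, 6, 7, 99):
--         grp = [x for x in reps if order.get(str(x.get("bucket") or ""), 99) == rank]
--         grp.sort(key=lambda x: str(x.get("display_name") or ""))
--         for x in grp:
--             name = str(x.get("display_name") or "").strip()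
--             out.append({
--                 "ref": str(x.get("explore_ref") or ""),
--                 "name": name if name else str(x.get("explore_ref")),
--                 "bucket": str(x.get("bucket") or "other"),
--                 "ref_type": str(x.get("ref_type") or ""),
--                 "source": str(x.get("src") or ""),
--             })
--     return out
-- ===== Notes on version B (the rewrite author's own statement) =====
-- stated objective: alternative
-- what changed: A threads one dict through a greedy loop that overwrites an entry when a later 'direct' row arrives and then sorts by a (rank, name) tuple key; B makes two setdefault passes (first row and first 'direct' row per ref), picks each representative by dict lookup with fallback, and replaces the tuple-key sort by a counting sort over the nine fixed bucket ranks with a per-bucket sort on display_name.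
import Mathlib
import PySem

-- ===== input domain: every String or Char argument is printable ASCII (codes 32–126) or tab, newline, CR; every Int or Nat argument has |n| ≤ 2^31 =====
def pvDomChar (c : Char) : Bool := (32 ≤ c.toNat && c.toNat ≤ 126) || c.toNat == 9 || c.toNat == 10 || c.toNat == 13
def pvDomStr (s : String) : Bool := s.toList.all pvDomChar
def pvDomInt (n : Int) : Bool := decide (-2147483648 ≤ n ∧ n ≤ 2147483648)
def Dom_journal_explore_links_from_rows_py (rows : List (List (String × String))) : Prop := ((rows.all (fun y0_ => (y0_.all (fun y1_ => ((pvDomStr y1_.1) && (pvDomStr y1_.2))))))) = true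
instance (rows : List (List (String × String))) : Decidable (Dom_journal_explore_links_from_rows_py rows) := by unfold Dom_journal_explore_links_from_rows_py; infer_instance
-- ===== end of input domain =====

-- B replaces A's greedy dict-overwrite loop and tuple-key sort by two setdefault passes
-- (first row / first 'direct' row per ref) and a counting sort over the nine fixed bucket
-- ranks with a per-bucket sort on display_name; objective: alternative.

-- ===== PORT A =====
-- str(r.get(k) or "")
def pvGetS (r : List (String × String)) (k : String) : String :=
  (((r.find? (fun p => p.1 == k)).map (fun p => p.2)).getD "")

-- str(r.get("explore_ref") or "").strip()
def pvEr (r : List (String × String)) : String :=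
  PySem.Str.strip (pvGetS r "explore_ref")

def pvSrc (r : List (String × String)) : String := pvGetS r "src"

def pvOrder : PySem.Dict String Int :=
  PySem.Dict.ofList [("person", 0), ("situation", 1), ("place", 2), ("idea", 3),
                     ("group", 4), ("tag", 5), ("day", 6), ("other", 7)]

def pvKey1 (x : List (String × String)) : Int := pvOrder.getD (pvGetS x "bucket") 99
def pvKey2 (x : List (String × String)) : String := pvGetS x "display_name"

-- the five-key output dict of A
def pvFmt (x : List (String × String)) : List (String × String) :=
  [("ref", pvGetS x "explore_ref"),
   ("name",
     let n := PySem.Str.strip (pvGetS x "display_name")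
     if n = "" then
       -- str(x.get("explore_ref")) : Python renders a missing key as "None"
       (match (x.find? (fun p => p.1 == "explore_ref")).map (fun p => p.2) with
        | none => "None"
        | some s => s)
     else n),
   ("bucket", let b := pvGetS x "bucket"; if b = "" then "other" else b),
   ("ref_type", pvGetS x "ref_type"),
   ("source", pvSrc x)]

-- A's loop body: dict keyed by stripped ref, overwritten when a 'direct' row arrives later
def pvStepA (d : PySem.Dict String (List (String × String))) (r : List (String × String)) :
    PySem.Dict String (List (String × String)) :=
  let er := pvEr r
  if er = "" then d
  else
    let src := pvSrc r
    match d.get? er with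
    | none => d.insert er r
    | some prev =>
        if pvSrc prev ≠ "direct" ∧ src = "direct" then d.insert er r else d

def journal_explore_links_from_rows_py (rows : List (List (String × String))) :
    List (List (String × String)) :=
  let by_ref := rows.foldl pvStepA PySem.Dict.empty
  let out := PySem.List.sorted2 by_ref.values pvKey1 pvKey2
  out.map pvFmt

-- ===== PORT B =====
-- B's own lookup helper: str(r.get(k) or "")
def altStr (r : List (String × String)) (k : String) : String :=
  match r.find? (fun p => p.1 == k) with
  | some p => p.2
  | none => ""

-- stripped explore_ref
def altRef (r : List (String × String)) : String := PySem.Str.strip (altStr r "explore_ref")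

-- one walk over the rows maintaining (first_seen, direct_row); setdefault = insert-if-absent
def altPass (rows : List (List (String × String)))
    (fs dr : PySem.Dict String (List (String × String))) :
    PySem.Dict String (List (String × String)) × PySem.Dict String (List (String × String)) :=
  match rows with
  | [] => (fs, dr)
  | r :: rest =>
      let er := altRef r
      if er = "" then altPass rest fs dr
      else
        altPass rest
          (if fs.contains er then fs else fs.insert er r)
          (if altStr r "src" = "direct" ∧ ¬ dr.contains er then dr.insert er r else dr)

-- order.get(str(x.get("bucket") or ""), 99)
def altRank (x : List (String × String)) : Int :=
  match ([("person", (0:Int)), ("situation", 1), ("place", 2), ("idea", 3),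
          ("group", 4), ("tag", 5), ("day", 6), ("other", 7)]).find?
          (fun p => p.1 == altStr x "bucket") with
  | some p => p.2
  | none => 99

def altName (x : List (String × String)) : String := altStr x "display_name"

-- the five-key output dict of B
def altFmt (x : List (String × String)) : List (String × String) :=
  let nm := PySem.Str.strip (altStr x "display_name")
  [("ref", altStr x "explore_ref"),
   ("name", if nm = "" then
       -- str(x.get("explore_ref")): Python renders a missing key as "None"
       (match x.find? (fun p => p.1 == "explore_ref") with
        | some p => p.2
        | none => "None")
     else nm),
   ("bucket", if altStr x "bucket" = "" then "other" else altStr x "bucket"),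
   ("ref_type", altStr x "ref_type"),
   ("source", altStr x "src")]

def journal_explore_links_from_rows_py_alt (rows : List (List (String × String))) :
    List (List (String × String)) :=
  let fsdr := altPass rows PySem.Dict.empty PySem.Dict.empty
  let reps := fsdr.1.items.map (fun p =>
    match fsdr.2.get? p.1 with
    | some d => d
    | none => p.2)
  ([0, 1, 2, 3, 4, 5, 6, 7, 99] : List Int).flatMap (fun rank =>
    (PySem.List.sorted (reps.filter (fun x => altRank x = rank)) altName).map altFmt)

-- ===== PRECONDITION & SPEC =====
def Spec_journal_explore_links_from_rows_py (rows : List (List (String × String))) (out : List (List (String × String))) : Prop := out = journal_explore_links_from_rows_py_alt rows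
instance (rows : List (List (String × String))) (out : List (List (String × String))) : Decidable (Spec_journal_explore_links_from_rows_py rows out) := by unfold Spec_journal_explore_links_from_rows_py; infer_instance

-- ===== CLAIM =====
def Claim_equal_journal_explore_links_from_rows_py : Prop := ∀ (rows : List (List (String × String))), Dom_journal_explore_links_from_rows_py rows → Spec_journal_explore_links_from_rows_py rows (journal_explore_links_from_rows_py rows)

-- ===== LEMMAS AND PROOFS =====

-- bridges between B's helpers and A's
lemma altStr_eq (r : List (String × String)) (k : String) : altStr r k = pvGetS r k := by
  unfold altStr pvGetS
  cases h : r.find? (fun p => p.1 == k) <;> simp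

lemma altRef_eq (r : List (String × String)) : altRef r = pvEr r := by
  unfold altRef pvEr; rw [altStr_eq]

-- the distinct non-empty stripped refs, in first-appearance order
def pvErs (rows : List (List (String × String))) : List String :=
  PySem.List.dedup ((rows.map pvEr).filter (fun e => e ≠ ""))

-- first row of the group of e
def pvFirst (rows : List (List (String × String))) (e : String) : List (String × String) :=
  (rows.filter (fun r => pvEr r = e)).headD []

-- first 'direct' row of the group of e
def pvFirstD (rows : List (List (String × String))) (e : String) : List (String × String) :=
  ((rows.filter (fun r => pvEr r = e)).find? (fun r => pvSrc r = "direct")).getD []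

-- group representative: first 'direct' row, else first row
def pvRep (rows : List (List (String × String))) (e : String) : List (String × String) :=
  match (rows.filter (fun r => pvEr r = e)).find? (fun r => pvSrc r = "direct") with
  | some r => r
  | none => pvFirst rows e

-- refs that have some direct row, in first-direct-appearance order
def pvDErs (rows : List (List (String × String))) : List String :=
  PySem.List.dedup ((rows.filter (fun r => pvEr r ≠ "" ∧ pvSrc r = "direct")).map pvEr)

-- the dicts the two passes build, in closed form
def pvFS (rows : List (List (String × String))) : PySem.Dict String (List (String × String)) :=
  PySem.Dict.mk ((pvErs rows).map (fun e => (e, pvFirst rows e)))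

def pvDR (rows : List (List (String × String))) : PySem.Dict String (List (String × String)) :=
  PySem.Dict.mk ((pvDErs rows).map (fun e => (e, pvFirstD rows e)))

-- the dict A's loop builds, in closed form
def pvS (rows : List (List (String × String))) : PySem.Dict String (List (String × String)) :=
  PySem.Dict.mk ((pvErs rows).map (fun e => (e, pvRep rows e)))

lemma pvGet?_mkmap {α : Type} (f : String → α) (l : List String) (x : String) :
    (PySem.Dict.mk (l.map (fun e => (e, f e)))).get? x
      = if x ∈ l then some (f x) else none := by
  induction l with
  | nil => simp [PySem.Dict.get?]
  | cons a t ih =>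
      simp only [PySem.Dict.get?] at ih ⊢
      simp only [List.map_cons, List.find?_cons, List.mem_cons]
      by_cases h : a = x
      · subst h; simp
      · have hb : (((a, f a).1 == x)) = false := by simp [h]
        rw [hb]
        rw [ih]
        simp [Ne.symm h]

lemma pvContains_mkmap {α : Type} (f : String → α) (l : List String) (x : String) :
    (PySem.Dict.mk (l.map (fun e => (e, f e)))).contains x = decide (x ∈ l) := by
  induction l with
  | nil => simp [PySem.Dict.contains]
  | cons a t ih =>
      simp only [PySem.Dict.contains, List.map_cons, List.any_cons] at ih ⊢
      by_cases h : a = x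
      · simp [h]
      · simp [h, Ne.symm h, ih]

lemma pvInsert_mkmap_not_mem {α : Type} (f : String → α) (l : List String) (x : String) (v : α)
    (h : x ∉ l) :
    (PySem.Dict.mk (l.map (fun e => (e, f e)))).insert x v
      = PySem.Dict.mk (l.map (fun e => (e, f e)) ++ [(x, v)]) := by
  simp only [PySem.Dict.insert, pvContains_mkmap, h, decide_false]
  simp

lemma pvMem_ers (rows : List (List (String × String))) (e : String) :
    e ∈ pvErs rows ↔ (e ≠ "" ∧ ∃ r ∈ rows, pvEr r = e) := by
  unfold pvErs
  rw [show (PySem.List.dedup : List String → List String) = PySem.Set.ofList from rfl]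
  rw [PySem.Set.mem_ofList]
  simp only [List.mem_filter, List.mem_map]
  constructor
  · rintro ⟨⟨rr, hrr, rfl⟩, hne⟩
    exact ⟨by simpa using hne, rr, hrr, rfl⟩
  · rintro ⟨hne, rr, hrr, rfl⟩
    exact ⟨⟨rr, hrr, rfl⟩, by simpa using hne⟩

lemma pvMem_ders (rows : List (List (String × String))) (e : String) :
    e ∈ pvDErs rows ↔ (e ≠ "" ∧ ∃ r ∈ rows, pvEr r = e ∧ pvSrc r = "direct") := by
  unfold pvDErs
  rw [show (PySem.List.dedup : List String → List String) = PySem.Set.ofList from rfl]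
  rw [PySem.Set.mem_ofList]
  simp only [List.mem_map, List.mem_filter]
  constructor
  · rintro ⟨rr, ⟨hrr, hp⟩, rfl⟩
    have hp' : pvEr rr ≠ "" ∧ pvSrc rr = "direct" := by simpa using hp
    exact ⟨hp'.1, rr, hrr, rfl, hp'.2⟩
  · rintro ⟨hne, rr, hrr, rfl, hd⟩
    exact ⟨rr, ⟨hrr, by simpa using ⟨hne, hd⟩⟩, rfl⟩

lemma pvDedup_append_one (as : List String) (x : String) :
    PySem.List.dedup (as ++ [x])
      = if x ∈ PySem.List.dedup as then PySem.List.dedup as else PySem.List.dedup as ++ [x] := by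
  rw [show (PySem.List.dedup : List String → List String) = PySem.Set.ofList from rfl]
  have h : PySem.Set.ofList (as ++ [x]) = PySem.Set.add (PySem.Set.ofList as) x := by
    simp [PySem.Set.ofList, List.foldl_append]
  rw [h]
  by_cases hm : x ∈ PySem.Set.ofList as
  · rw [if_pos hm]
    simp only [PySem.Set.add, PySem.Set.contains]
    rw [if_pos (by simpa using hm)]
  · rw [if_neg hm]
    simp only [PySem.Set.add, PySem.Set.contains]
    rw [if_neg (by simpa using hm)]

lemma pvErs_append_one (rows : List (List (String × String))) (r : List (String × String)) :
    pvErs (rows ++ [r])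
      = if pvEr r = "" ∨ pvEr r ∈ pvErs rows then pvErs rows else pvErs rows ++ [pvEr r] := by
  by_cases h : pvEr r = ""
  · rw [if_pos (Or.inl h)]
    unfold pvErs
    rw [List.map_append, List.filter_append]
    simp [h]
  · have hstep : pvErs (rows ++ [r]) = PySem.Set.add (pvErs rows) (pvEr r) := by
      unfold pvErs
      rw [show (PySem.List.dedup : List String → List String) = PySem.Set.ofList from rfl]
      rw [List.map_append, List.filter_append]
      have hf : List.filter (fun e => e ≠ "") (List.map pvEr [r]) = [pvEr r] := by simp [h]
      rw [hf]
      simp [PySem.Set.ofList, List.foldl_append]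
    rw [hstep]
    by_cases hm : pvEr r ∈ pvErs rows
    · rw [if_pos (Or.inr hm)]
      simp only [PySem.Set.add, PySem.Set.contains]
      rw [if_pos (by simpa using hm)]
    · rw [if_neg (show ¬(pvEr r = "" ∨ pvEr r ∈ pvErs rows) from fun hc => hc.elim h hm)]
      simp only [PySem.Set.add, PySem.Set.contains]
      rw [if_neg (by simpa using hm)]

lemma pvDErs_append_one (rows : List (List (String × String))) (r : List (String × String)) :
    pvDErs (rows ++ [r])
      = if pvEr r ≠ "" ∧ pvSrc r = "direct" ∧ pvEr r ∉ pvDErs rows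
        then pvDErs rows ++ [pvEr r] else pvDErs rows := by
  by_cases h : pvEr r ≠ "" ∧ pvSrc r = "direct"
  · unfold pvDErs
    rw [List.filter_append]
    have hf : List.filter (fun r => decide (pvEr r ≠ "" ∧ pvSrc r = "direct")) [r] = [r] := by
      simp [h.1, h.2]
    rw [hf, List.map_append, List.map_cons, List.map_nil, pvDedup_append_one]
    by_cases hm : pvEr r ∈ pvDErs rows
    · rw [if_pos (by exact hm), if_neg (fun hc => hc.2.2 hm)]
    · rw [if_neg (by exact hm), if_pos ⟨h.1, h.2, hm⟩]
  · rw [if_neg (show ¬(pvEr r ≠ "" ∧ pvSrc r = "direct" ∧ pvEr r ∉ pvDErs rows) from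
        fun hc => h ⟨hc.1, hc.2.1⟩)]
    unfold pvDErs
    rw [List.filter_append]
    have hf : List.filter (fun r => decide (pvEr r ≠ "" ∧ pvSrc r = "direct")) [r] = [] := by
      simp only [List.filter_cons, List.filter_nil]
      rw [if_neg (by simpa using h)]
    rw [hf, List.append_nil]

lemma pvFirst_append_ne (rows : List (List (String × String))) (r : List (String × String))
    (e : String) (h : pvEr r ≠ e) : pvFirst (rows ++ [r]) e = pvFirst rows e := by
  unfold pvFirst
  rw [List.filter_append]
  have : List.filter (fun x => decide (pvEr x = e)) [r] = [] := by simp [h]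
  rw [this, List.append_nil]

lemma pvFirst_append_mem (rows : List (List (String × String))) (r : List (String × String))
    (e : String) (h : e ∈ pvErs rows) : pvFirst (rows ++ [r]) e = pvFirst rows e := by
  obtain ⟨hne, rr, hrr, hrre⟩ := (pvMem_ers rows e).1 h
  unfold pvFirst
  rw [List.filter_append]
  have hmem : rr ∈ rows.filter (fun x => decide (pvEr x = e)) := by
    rw [List.mem_filter]; exact ⟨hrr, by simpa using hrre⟩
  cases hg : rows.filter (fun x => decide (pvEr x = e)) with
  | nil => rw [hg] at hmem; simp at hmem
  | cons a t => rfl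

lemma pvFirstD_append_ne (rows : List (List (String × String))) (r : List (String × String))
    (e : String) (h : pvEr r ≠ e) : pvFirstD (rows ++ [r]) e = pvFirstD rows e := by
  unfold pvFirstD
  rw [List.filter_append]
  have : List.filter (fun x => decide (pvEr x = e)) [r] = [] := by simp [h]
  rw [this, List.append_nil]

lemma pvFirstD_append_nd (rows : List (List (String × String))) (r : List (String × String))
    (e : String) (h : pvSrc r ≠ "direct") : pvFirstD (rows ++ [r]) e = pvFirstD rows e := by
  unfold pvFirstD
  rw [List.filter_append, List.find?_append]
  have : List.find? (fun x => decide (pvSrc x = "direct"))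
      (List.filter (fun x => decide (pvEr x = e)) [r]) = none := by
    simp only [List.filter_cons, List.filter_nil]
    by_cases he : pvEr r = e
    · rw [if_pos (by simpa using he)]; simp [h]
    · rw [if_neg (by simpa using he)]; simp
  rw [this, Option.or_none]

lemma pvFirstD_append_mem (rows : List (List (String × String))) (r : List (String × String))
    (e : String) (h : e ∈ pvDErs rows) : pvFirstD (rows ++ [r]) e = pvFirstD rows e := by
  obtain ⟨hne, rr, hrr, hrre, hrd⟩ := (pvMem_ders rows e).1 h
  unfold pvFirstD
  rw [List.filter_append, List.find?_append]
  have hmem : rr ∈ rows.filter (fun x => decide (pvEr x = e)) := by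
    rw [List.mem_filter]; exact ⟨hrr, by simpa using hrre⟩
  have hsome : ((rows.filter (fun x => decide (pvEr x = e))).find?
      (fun x => decide (pvSrc x = "direct"))).isSome := by
    rw [List.find?_isSome]
    exact ⟨rr, hmem, by simpa using hrd⟩
  cases hfind : (rows.filter (fun x => decide (pvEr x = e))).find?
      (fun x => decide (pvSrc x = "direct")) with
  | none => rw [hfind] at hsome; simp at hsome
  | some d => rfl

-- the two setdefault dicts after one more row
lemma pvFS_append (rows : List (List (String × String))) (r : List (String × String)) :
    pvFS (rows ++ [r])
      = if pvEr r = "" ∨ pvEr r ∈ pvErs rows then pvFS rows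
        else (pvFS rows).insert (pvEr r) r := by
  by_cases h : pvEr r = "" ∨ pvEr r ∈ pvErs rows
  · rw [if_pos h]
    unfold pvFS
    rw [pvErs_append_one, if_pos h]
    refine congrArg PySem.Dict.mk ?_
    apply List.map_congr_left
    intro e he
    by_cases hee : pvEr r = e
    · rcases h with h | h
      · exact absurd (h ▸ hee).symm (((pvMem_ers rows e).1 he).1)
      · rw [hee] at h
        rw [pvFirst_append_mem _ _ _ h]
    · rw [pvFirst_append_ne _ _ _ hee]
  · rw [if_neg h]
    rw [not_or] at h
    unfold pvFS
    rw [pvErs_append_one, if_neg (show ¬(pvEr r = "" ∨ pvEr r ∈ pvErs rows) from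
        fun hc => hc.elim h.1 h.2), List.map_append]
    rw [pvInsert_mkmap_not_mem _ _ _ _ h.2]
    refine congrArg PySem.Dict.mk ?_
    refine congrArg₂ (· ++ ·) ?_ ?_
    · apply List.map_congr_left
      intro e he
      rw [pvFirst_append_ne _ _ _ (fun hh => h.2 (hh ▸ he))]
    · rw [List.map_cons, List.map_nil]
      have hg0 : rows.filter (fun x => decide (pvEr x = pvEr r)) = [] := by
        rw [List.filter_eq_nil_iff]
        intro a ha hpa
        exact h.2 ((pvMem_ers rows (pvEr r)).2 ⟨h.1, a, ha, by simpa using hpa⟩)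
      have hfv : pvFirst (rows ++ [r]) (pvEr r) = r := by
        unfold pvFirst
        rw [List.filter_append, hg0, List.nil_append]
        simp
      rw [hfv]

lemma pvDR_append (rows : List (List (String × String))) (r : List (String × String))
    (hne : pvEr r ≠ "") :
    pvDR (rows ++ [r])
      = if pvSrc r = "direct" ∧ pvEr r ∉ pvDErs rows
        then (pvDR rows).insert (pvEr r) r else pvDR rows := by
  by_cases h : pvSrc r = "direct" ∧ pvEr r ∉ pvDErs rows
  · rw [if_pos h]
    unfold pvDR
    rw [pvDErs_append_one, if_pos ⟨hne, h.1, h.2⟩, List.map_append]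
    rw [pvInsert_mkmap_not_mem _ _ _ _ h.2]
    refine congrArg PySem.Dict.mk ?_
    refine congrArg₂ (· ++ ·) ?_ ?_
    · apply List.map_congr_left
      intro e he
      rw [pvFirstD_append_ne _ _ _ (fun hh => h.2 (hh ▸ he))]
    · rw [List.map_cons, List.map_nil]
      have hdv : pvFirstD (rows ++ [r]) (pvEr r) = r := by
        unfold pvFirstD
        rw [List.filter_append, List.find?_append]
        have hfind : (rows.filter (fun x => decide (pvEr x = pvEr r))).find?
            (fun x => decide (pvSrc x = "direct")) = none := by
          rw [List.find?_eq_none]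
          intro a ha hpa
          rw [List.mem_filter] at ha
          exact h.2 ((pvMem_ders rows (pvEr r)).2
            ⟨hne, a, ha.1, by simpa using ha.2, by simpa using hpa⟩)
        rw [hfind]
        have hfr : List.filter (fun x => decide (pvEr x = pvEr r)) [r] = [r] := by simp
        rw [hfr]
        simp [h.1]
      rw [hdv]
  · rw [if_neg h]
    unfold pvDR
    rw [pvDErs_append_one, if_neg (show ¬(pvEr r ≠ "" ∧ pvSrc r = "direct" ∧
        pvEr r ∉ pvDErs rows) from fun hc => h ⟨hc.2.1, hc.2.2⟩)]
    refine congrArg PySem.Dict.mk ?_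
    apply List.map_congr_left
    intro e he
    by_cases hd : pvSrc r = "direct"
    · have hm : pvEr r ∈ pvDErs rows := by
        by_cases hm' : pvEr r ∈ pvDErs rows
        · exact hm'
        · exact absurd ⟨hd, hm'⟩ h
      by_cases hee : pvEr r = e
      · rw [pvFirstD_append_mem _ _ _ (hee ▸ hm)]
      · rw [pvFirstD_append_ne _ _ _ hee]
    · rw [pvFirstD_append_nd _ _ _ hd]

-- B's pass computes exactly (pvFS, pvDR)
lemma altPass_spec (rest pre : List (List (String × String))) :
    altPass rest (pvFS pre) (pvDR pre) = (pvFS (pre ++ rest), pvDR (pre ++ rest)) := by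
  induction rest generalizing pre with
  | nil => simp [altPass]
  | cons r t ih =>
      rw [show altPass (r :: t) (pvFS pre) (pvDR pre)
          = (if altRef r = "" then altPass t (pvFS pre) (pvDR pre)
             else altPass t
               (if (pvFS pre).contains (altRef r) then pvFS pre
                else (pvFS pre).insert (altRef r) r)
               (if altStr r "src" = "direct" ∧ ¬ (pvDR pre).contains (altRef r)
                then (pvDR pre).insert (altRef r) r else pvDR pre)) from rfl]
      rw [altRef_eq, altStr_eq]
      by_cases h0 : pvEr r = ""
      · rw [if_pos h0]
        have hFS : pvFS (pre ++ [r]) = pvFS pre := by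
          rw [pvFS_append, if_pos (Or.inl h0)]
        have hDR : pvDR (pre ++ [r]) = pvDR pre := by
          unfold pvDR
          rw [pvDErs_append_one, if_neg (show ¬(pvEr r ≠ "" ∧ pvSrc r = "direct" ∧
              pvEr r ∉ pvDErs pre) from fun hc => hc.1 h0)]
          refine congrArg PySem.Dict.mk ?_
          apply List.map_congr_left
          intro e he
          rw [pvFirstD_append_ne _ _ _
            (fun hh => (((pvMem_ders pre e).1 he).1) (hh.symm.trans h0))]
        have hrec := ih (pre ++ [r])
        rw [hFS, hDR, List.append_assoc] at hrec
        simpa using hrec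
      · rw [if_neg h0]
        have hcFS : (pvFS pre).contains (pvEr r) = decide (pvEr r ∈ pvErs pre) := by
          unfold pvFS; rw [pvContains_mkmap]
        have hcDR : (pvDR pre).contains (pvEr r) = decide (pvEr r ∈ pvDErs pre) := by
          unfold pvDR; rw [pvContains_mkmap]
        have hFS : (if (pvFS pre).contains (pvEr r) then pvFS pre
            else (pvFS pre).insert (pvEr r) r) = pvFS (pre ++ [r]) := by
          rw [hcFS, pvFS_append]
          by_cases hm : pvEr r ∈ pvErs pre
          · rw [if_pos (by simpa using hm), if_pos (Or.inr hm)]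
          · rw [if_neg (by simpa using hm),
                if_neg (show ¬(pvEr r = "" ∨ pvEr r ∈ pvErs pre) from
                  fun hc => hc.elim h0 hm)]
        have hDR : (if pvGetS r "src" = "direct" ∧ ¬ (pvDR pre).contains (pvEr r)
            then (pvDR pre).insert (pvEr r) r else pvDR pre) = pvDR (pre ++ [r]) := by
          rw [hcDR, pvDR_append _ _ h0]
          by_cases hd : pvSrc r = "direct" ∧ pvEr r ∉ pvDErs pre
          · rw [if_pos (by exact ⟨hd.1, by simpa using hd.2⟩), if_pos hd]
          · rw [if_neg (by simpa [pvSrc] using fun a b => hd ⟨a, b⟩), if_neg hd]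
        rw [hFS, hDR]
        have hrec := ih (pre ++ [r])
        rw [List.append_assoc] at hrec
        simpa using hrec

-- the representative list B builds is (pvErs rows).map (pvRep rows)
lemma pvReps_eq (rows : List (List (String × String))) :
    (pvFS rows).items.map (fun p =>
      match (pvDR rows).get? p.1 with
      | some d => d
      | none => p.2)
      = (pvErs rows).map (pvRep rows) := by
  unfold pvFS
  rw [show (PySem.Dict.mk ((pvErs rows).map (fun e => (e, pvFirst rows e)))).items
      = (pvErs rows).map (fun e => (e, pvFirst rows e)) from rfl]
  rw [List.map_map]
  apply List.map_congr_left
  intro e he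
  simp only [Function.comp]
  rw [show (pvDR rows).get? e
      = if e ∈ pvDErs rows then some (pvFirstD rows e) else none from pvGet?_mkmap _ _ _]
  by_cases hm : e ∈ pvDErs rows
  · rw [if_pos hm]
    obtain ⟨hne, rr, hrr, hrre, hrd⟩ := (pvMem_ders rows e).1 hm
    have hsome : ((rows.filter (fun x => decide (pvEr x = e))).find?
        (fun x => decide (pvSrc x = "direct"))).isSome := by
      rw [List.find?_isSome]
      exact ⟨rr, by rw [List.mem_filter]; exact ⟨hrr, by simpa using hrre⟩, by simpa using hrd⟩
    cases hfind : (rows.filter (fun x => decide (pvEr x = e))).find?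
        (fun x => decide (pvSrc x = "direct")) with
    | none => rw [hfind] at hsome; simp at hsome
    | some d =>
        unfold pvRep pvFirstD
        rw [hfind]
        simp
  · rw [if_neg hm]
    unfold pvRep
    have hfind : (rows.filter (fun x => decide (pvEr x = e))).find?
        (fun x => decide (pvSrc x = "direct")) = none := by
      rw [List.find?_eq_none]
      intro a ha hpa
      rw [List.mem_filter] at ha
      exact hm ((pvMem_ders rows e).2
        ⟨((pvMem_ers rows e).1 he).1, a, ha.1, by simpa using ha.2, by simpa using hpa⟩)
    rw [hfind]

-- ===== A-side: the greedy loop builds pvS =====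

lemma pvInsert_mkmap_mem {α : Type} (f : String → α) (l : List String) (x : String) (v : α)
    (h : x ∈ l) :
    (PySem.Dict.mk (l.map (fun e => (e, f e)))).insert x v
      = PySem.Dict.mk (l.map (fun e => if e = x then (e, v) else (e, f e))) := by
  simp only [PySem.Dict.insert, pvContains_mkmap, h, decide_true, if_true]
  refine congrArg PySem.Dict.mk ?_
  rw [List.map_map]
  apply List.map_congr_left
  intro a _
  by_cases ha : a = x <;> simp [ha]

lemma pvRep_append_ne (rows : List (List (String × String))) (r : List (String × String))
    (e : String) (h : pvEr r ≠ e) : pvRep (rows ++ [r]) e = pvRep rows e := by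
  unfold pvRep pvFirst
  rw [List.filter_append]
  have : List.filter (fun x => decide (pvEr x = e)) [r] = [] := by simp [h]
  rw [this, List.append_nil]

lemma pvRep_of_filter_nil (pre : List (List (String × String))) (r : List (String × String))
    (hg0 : pre.filter (fun x => pvEr x = pvEr r) = []) : pvRep (pre ++ [r]) (pvEr r) = r := by
  unfold pvRep pvFirst
  rw [List.filter_append, hg0, List.nil_append]
  have hfr : List.filter (fun x => decide (pvEr x = pvEr r)) [r] = [r] := by simp
  rw [hfr]
  by_cases hs : pvSrc r = "direct" <;> simp [hs]

set_option maxHeartbeats 2000000 in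
lemma pvStep_spec (pre : List (List (String × String))) (r : List (String × String)) :
    pvStepA (pvS pre) r = pvS (pre ++ [r]) := by
  by_cases h0 : pvEr r = ""
  · have hS : pvS (pre ++ [r]) = pvS pre := by
      unfold pvS
      rw [pvErs_append_one, if_pos (Or.inl h0)]
      refine congrArg PySem.Dict.mk ?_
      apply List.map_congr_left
      intro e he
      rw [pvRep_append_ne]
      rintro rfl
      exact ((pvMem_ers pre (pvEr r)).1 he).1 h0
    rw [hS]
    simp only [pvStepA]
    rw [if_pos h0]
  · by_cases hm : pvEr r ∈ pvErs pre
    · -- the key is already present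
      have hget : (pvS pre).get? (pvEr r) = some (pvRep pre (pvEr r)) := by
        unfold pvS; rw [pvGet?_mkmap, if_pos hm]
      have hstep : pvStepA (pvS pre) r =
          (if pvSrc (pvRep pre (pvEr r)) ≠ "direct" ∧ pvSrc r = "direct"
           then (pvS pre).insert (pvEr r) r else pvS pre) := by
        simp only [pvStepA, hget, h0]
        simp
      have hfr : List.filter (fun x => decide (pvEr x = pvEr r)) [r] = [r] := by simp
      cases hfind : (pre.filter (fun x => pvEr x = pvEr r)).find? (fun x => pvSrc x = "direct") with
      | some rd =>
          have hdir : pvSrc rd = "direct" := by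
            have := List.find?_some hfind
            simpa using this
          have hprev : pvRep pre (pvEr r) = rd := by simp only [pvRep]; rw [hfind]
          have hrep : pvRep (pre ++ [r]) (pvEr r) = rd := by
            simp only [pvRep]
            rw [List.filter_append, hfr, List.find?_append, hfind]
            rfl
          rw [hstep, if_neg (by simp [hprev, hdir])]
          unfold pvS
          rw [pvErs_append_one, if_pos (Or.inr hm)]
          refine congrArg PySem.Dict.mk ?_
          apply List.map_congr_left
          intro e he
          by_cases hee : pvEr r = e
          · rw [← hee, hprev, hrep]
          · rw [pvRep_append_ne _ _ _ hee]
      | none =>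
          have hall : ∀ x ∈ pre.filter (fun x => pvEr x = pvEr r), ¬(pvSrc x = "direct") := by
            intro x hx
            have := List.find?_eq_none.mp hfind x hx
            simpa using this
          obtain ⟨hne, rr, hrr, hrreq⟩ := (pvMem_ers pre (pvEr r)).1 hm
          have hrrg : rr ∈ pre.filter (fun x => pvEr x = pvEr r) := by
            rw [List.mem_filter]
            exact ⟨hrr, by simpa using hrreq⟩
          obtain ⟨a, t, hgat⟩ : ∃ a t, pre.filter (fun x => pvEr x = pvEr r) = a :: t := by
            cases hg : pre.filter (fun x => pvEr x = pvEr r) with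
            | nil => rw [hg] at hrrg; simp at hrrg
            | cons a t => exact ⟨a, t, rfl⟩
          have hprev : pvRep pre (pvEr r) = a := by
            simp only [pvRep, pvFirst]
            rw [hfind, hgat]
            rfl
          have hprevnd : pvSrc a ≠ "direct" := hall a (by rw [hgat]; exact List.mem_cons_self ..)
          by_cases hs : pvSrc r = "direct"
          · -- the new row is the first 'direct' one: A overwrites
            have hrep : pvRep (pre ++ [r]) (pvEr r) = r := by
              simp only [pvRep]
              rw [List.filter_append, hfr, List.find?_append, hfind]
              simp [hs]
            rw [hstep, if_pos ⟨by rw [hprev]; exact hprevnd, hs⟩]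
            unfold pvS
            rw [pvInsert_mkmap_mem _ _ _ _ hm]
            rw [pvErs_append_one, if_pos (Or.inr hm)]
            refine congrArg PySem.Dict.mk ?_
            apply List.map_congr_left
            intro e he
            by_cases hee : e = pvEr r
            · rw [if_pos hee, hee, hrep]
            · rw [if_neg hee, pvRep_append_ne _ _ _ (fun hh => hee hh.symm)]
          · have hrep : pvRep (pre ++ [r]) (pvEr r) = a := by
              simp only [pvRep, pvFirst]
              rw [List.filter_append, hfr, List.find?_append, hfind]
              have hnone : List.find? (fun x => decide (pvSrc x = "direct")) [r] = none := by
                simp [hs]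
              rw [hnone]
              simp only [Option.or_none]
              rw [hgat]
              rfl
            rw [hstep, if_neg (by simp [hs])]
            unfold pvS
            rw [pvErs_append_one, if_pos (Or.inr hm)]
            refine congrArg PySem.Dict.mk ?_
            apply List.map_congr_left
            intro e he
            by_cases hee : pvEr r = e
            · rw [← hee, hprev, hrep]
            · rw [pvRep_append_ne _ _ _ hee]
    · -- fresh key: A appends
      have hget : (pvS pre).get? (pvEr r) = none := by
        unfold pvS; rw [pvGet?_mkmap, if_neg hm]
      have hstep : pvStepA (pvS pre) r = (pvS pre).insert (pvEr r) r := by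
        simp only [pvStepA, hget, h0]
        simp
      have hg0 : pre.filter (fun x => pvEr x = pvEr r) = [] := by
        rw [List.filter_eq_nil_iff]
        intro a ha hpa
        exact hm ((pvMem_ers pre (pvEr r)).2 ⟨h0, a, ha, by simpa using hpa⟩)
      rw [hstep]
      unfold pvS
      rw [pvInsert_mkmap_not_mem _ _ _ _ hm]
      rw [pvErs_append_one, if_neg (show ¬(pvEr r = "" ∨ pvEr r ∈ pvErs pre) from
          fun hc => hc.elim h0 hm), List.map_append]
      refine congrArg PySem.Dict.mk ?_
      refine congrArg₂ (· ++ ·) ?_ ?_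
      · apply List.map_congr_left
        intro e he
        rw [pvRep_append_ne _ _ _ (fun hh => hm (hh ▸ he))]
      · rw [List.map_cons, List.map_nil, pvRep_of_filter_nil pre r hg0]

lemma pvFold_spec (rest pre : List (List (String × String))) :
    rest.foldl pvStepA (pvS pre) = pvS (pre ++ rest) := by
  induction rest generalizing pre with
  | nil => simp
  | cons r t ih =>
      rw [List.foldl_cons, pvStep_spec pre r, ih (pre ++ [r])]
      simp

-- ===== the stable counting-sort decomposition of sorted2 =====

lemma pvInsertBy_nil {α : Type} (before : α → α → Bool) (x : α) :
    PySem.List.insertBy before x [] = [x] := rfl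

lemma pvInsertBy_cons {α : Type} (before : α → α → Bool) (x y : α) (ys : List α) :
    PySem.List.insertBy before x (y :: ys)
      = if before x y then x :: y :: ys else y :: PySem.List.insertBy before x ys := rfl

lemma pvInsertBy_skip {α : Type} (before : α → α → Bool) (x : α) (as bs : List α)
    (h : ∀ y ∈ as, before x y = false) :
    PySem.List.insertBy before x (as ++ bs) = as ++ PySem.List.insertBy before x bs := by
  induction as with
  | nil => simp
  | cons a t ih =>
      rw [List.cons_append, pvInsertBy_cons, if_neg (by simp [h a (by simp)]),
        ih (fun y hy => h y (by simp [hy]))]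
      rfl

lemma pvInsertBy_confine {α : Type} (before : α → α → Bool) (x : α) (as bs : List α)
    (h : ∀ y ∈ bs, before x y = true) :
    PySem.List.insertBy before x (as ++ bs) = PySem.List.insertBy before x as ++ bs := by
  induction as with
  | nil =>
      cases bs with
      | nil => simp
      | cons b t => simp [pvInsertBy_cons, pvInsertBy_nil, h b (by simp)]
  | cons a t ih =>
      rw [List.cons_append, pvInsertBy_cons, pvInsertBy_cons]
      by_cases ha : before x a
      · rw [if_pos ha, if_pos ha]; rfl
      · rw [if_neg ha, if_neg ha, List.cons_append, ih]

lemma pvInsertBy_congr {α : Type} (before before' : α → α → Bool) (x : α) (ys : List α)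
    (h : ∀ y ∈ ys, before x y = before' x y) :
    PySem.List.insertBy before x ys = PySem.List.insertBy before' x ys := by
  induction ys with
  | nil => rfl
  | cons a t ih =>
      rw [pvInsertBy_cons, pvInsertBy_cons, h a (by simp),
        ih (fun y hy => h y (by simp [hy]))]

lemma pvFlatMap_congr {β γ : Type} (l : List β) (f g : β → List γ)
    (h : ∀ v ∈ l, f v = g v) : l.flatMap f = l.flatMap g := by
  induction l with
  | nil => rfl
  | cons a t ih =>
      rw [List.flatMap_cons, List.flatMap_cons, h a (by simp),
        ih (fun v hv => h v (by simp [hv]))]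

lemma pvSorted_append_one {α : Type} (xs : List α) (x : α) (k2 : α → String) :
    PySem.List.sorted (xs ++ [x]) k2
      = PySem.List.insertBy (fun a b => decide (k2 a < k2 b)) x (PySem.List.sorted xs k2) := by
  simp [PySem.List.sorted, List.foldl_append]

lemma pvSorted2_append_one {α : Type} (xs : List α) (x : α) (k1 : α → Int) (k2 : α → String) :
    PySem.List.sorted2 (xs ++ [x]) k1 k2
      = PySem.List.insertBy
          (fun a b => decide (k1 a < k1 b) || (!decide (k1 b < k1 a) && decide (k2 a < k2 b)))
          x (PySem.List.sorted2 xs k1 k2) := by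
  simp [PySem.List.sorted2, List.foldl_append]

set_option maxHeartbeats 1600000 in
lemma pvSorted2_flatMap {α : Type} (k1 : α → Int) (k2 : α → String) (vs : List Int)
    (hvs : vs.Pairwise (· < ·)) (xs : List α) (hmem : ∀ x ∈ xs, k1 x ∈ vs) :
    PySem.List.sorted2 xs k1 k2
      = vs.flatMap (fun v =>
          PySem.List.sorted (xs.filter (fun x => decide (k1 x = v))) k2) := by
  induction xs using List.reverseRecOn with
  | nil => simp [PySem.List.sorted2, PySem.List.sorted]
  | append_singleton as x ih =>
      have hx := hmem x (by simp)
      have has : ∀ y ∈ as, k1 y ∈ vs := fun y hy => hmem y (by simp [hy])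
      rw [pvSorted2_append_one, ih has]
      obtain ⟨vs1, vs2, rfl⟩ := List.append_of_mem hx
      have hp := hvs
      rw [List.pairwise_append] at hp
      have h1 : ∀ v ∈ vs1, v < k1 x := fun v hv => hp.2.2 v hv (k1 x) (by simp)
      have h2 : ∀ v ∈ vs2, k1 x < v := by
        have := hp.2.1
        rw [List.pairwise_cons] at this
        exact fun v hv => this.1 v hv
      -- filters over as ++ [x]
      have hfilter_ne : ∀ v : Int, v ≠ k1 x →
          (as ++ [x]).filter (fun y => decide (k1 y = v))
            = as.filter (fun y => decide (k1 y = v)) := by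
        intro v hv
        rw [List.filter_append]
        have : List.filter (fun y => decide (k1 y = v)) [x] = [] := by
          simp only [List.filter_cons, List.filter_nil]
          rw [if_neg (by simpa using fun hh => hv hh.symm)]
        rw [this, List.append_nil]
      have hfilter_eq :
          (as ++ [x]).filter (fun y => decide (k1 y = k1 x))
            = as.filter (fun y => decide (k1 y = k1 x)) ++ [x] := by
        rw [List.filter_append]
        refine congrArg₂ (· ++ ·) rfl ?_
        simp
      have hseg1 : ∀ v ∈ vs1, ((as ++ [x]).filter (fun y => decide (k1 y = v)))
          = as.filter (fun y => decide (k1 y = v)) :=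
        fun v hv => hfilter_ne v (by intro hh; exact absurd (hh ▸ h1 v hv) (lt_irrefl _))
      have hseg2 : ∀ v ∈ vs2, ((as ++ [x]).filter (fun y => decide (k1 y = v)))
          = as.filter (fun y => decide (k1 y = v)) :=
        fun v hv => hfilter_ne v (by intro hh; exact absurd (hh ▸ h2 v hv) (lt_irrefl _))
      have e1 : vs1.flatMap (fun v =>
            PySem.List.sorted ((as ++ [x]).filter (fun y => decide (k1 y = v))) k2)
          = vs1.flatMap (fun v =>
            PySem.List.sorted (as.filter (fun y => decide (k1 y = v))) k2) :=
        pvFlatMap_congr _ _ _ (fun v hv => by rw [hseg1 v hv])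
      have e2 : vs2.flatMap (fun v =>
            PySem.List.sorted ((as ++ [x]).filter (fun y => decide (k1 y = v))) k2)
          = vs2.flatMap (fun v =>
            PySem.List.sorted (as.filter (fun y => decide (k1 y = v))) k2) :=
        pvFlatMap_congr _ _ _ (fun v hv => by rw [hseg2 v hv])
      rw [List.flatMap_append, List.flatMap_cons, List.flatMap_append, List.flatMap_cons,
          e1, e2, hfilter_eq, pvSorted_append_one]
      set lt := fun a b => decide (k1 a < k1 b) || (!decide (k1 b < k1 a) && decide (k2 a < k2 b))
        with hlt
      have hskip : ∀ y ∈ vs1.flatMap (fun v =>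
          PySem.List.sorted (as.filter (fun z => decide (k1 z = v))) k2), lt x y = false := by
        intro y hy
        rw [List.mem_flatMap] at hy
        obtain ⟨v, hv, hy⟩ := hy
        rw [PySem.List.mem_sorted, List.mem_filter] at hy
        have hky : k1 y = v := by simpa using hy.2
        have hvx : v < k1 x := h1 v hv
        rw [hlt]
        simp only [Bool.or_eq_false_iff, Bool.and_eq_false_iff]
        constructor
        · simp [hky]; omega
        · left; simp [hky]; omega
      have hconf : ∀ y ∈ vs2.flatMap (fun v =>
          PySem.List.sorted (as.filter (fun z => decide (k1 z = v))) k2), lt x y = true := by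
        intro y hy
        rw [List.mem_flatMap] at hy
        obtain ⟨v, hv, hy⟩ := hy
        rw [PySem.List.mem_sorted, List.mem_filter] at hy
        have hky : k1 y = v := by simpa using hy.2
        have hvx : k1 x < v := h2 v hv
        rw [hlt]
        simp [hky]
        omega
      have hmid : ∀ y ∈ PySem.List.sorted (as.filter (fun z => decide (k1 z = k1 x))) k2,
          lt x y = (fun a b => decide (k2 a < k2 b)) x y := by
        intro y hy
        rw [PySem.List.mem_sorted, List.mem_filter] at hy
        have hky : k1 y = k1 x := by simpa using hy.2
        rw [hlt]
        simp [hky]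
      rw [pvInsertBy_skip _ _ _ _ hskip, pvInsertBy_confine _ _ _ _ hconf,
          pvInsertBy_congr lt (fun a b => decide (k2 a < k2 b)) x _ hmid]

-- every pvKey1 value is one of the nine ranks
lemma pvKey1_mem (x : List (String × String)) :
    pvKey1 x ∈ ([0, 1, 2, 3, 4, 5, 6, 7, 99] : List Int) := by
  unfold pvKey1 PySem.Dict.getD
  cases h : pvOrder.get? (pvGetS x "bucket") with
  | none => simp
  | some v =>
      simp only [Option.getD_some]
      simp only [pvOrder, PySem.Dict.get?] at h
      cases hf : List.find? (fun p => p.1 == pvGetS x "bucket")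
          (PySem.Dict.ofList [("person", (0:Int)), ("situation", 1), ("place", 2), ("idea", 3),
            ("group", 4), ("tag", 5), ("day", 6), ("other", 7)]).items with
      | none => rw [hf] at h; simp at h
      | some p =>
          rw [hf] at h
          simp only [Option.map_some, Option.some.injEq] at h
          have hp := List.mem_of_find?_eq_some hf
          have hitems : (PySem.Dict.ofList [("person", (0:Int)), ("situation", 1), ("place", 2),
              ("idea", 3), ("group", 4), ("tag", 5), ("day", 6), ("other", 7)]).items
              = [("person", (0:Int)), ("situation", 1), ("place", 2), ("idea", 3),
                 ("group", 4), ("tag", 5), ("day", 6), ("other", 7)] := by decide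
          rw [hitems] at hp
          rw [← h]
          simp only [List.mem_cons, List.not_mem_nil, or_false] at hp
          rcases hp with h'|h'|h'|h'|h'|h'|h'|h' <;> (subst h'; decide)

-- B's rank/name/format agree with A's sort keys and formatter
lemma altRank_eq (x : List (String × String)) : altRank x = pvKey1 x := by
  unfold altRank pvKey1 pvOrder PySem.Dict.getD PySem.Dict.get?
  rw [altStr_eq]
  have hitems : (PySem.Dict.ofList [("person", (0:Int)), ("situation", 1), ("place", 2),
      ("idea", 3), ("group", 4), ("tag", 5), ("day", 6), ("other", 7)]).items
      = [("person", (0:Int)), ("situation", 1), ("place", 2), ("idea", 3),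
         ("group", 4), ("tag", 5), ("day", 6), ("other", 7)] := by decide
  rw [hitems]
  cases h : List.find? (fun p => p.1 == pvGetS x "bucket")
      [("person", (0:Int)), ("situation", 1), ("place", 2), ("idea", 3),
       ("group", 4), ("tag", 5), ("day", 6), ("other", 7)] <;> simp

lemma altName_eq (x : List (String × String)) : altName x = pvKey2 x := by
  unfold altName pvKey2; rw [altStr_eq]

lemma altFmt_eq (x : List (String × String)) : altFmt x = pvFmt x := by
  unfold altFmt pvFmt pvSrc
  simp only [altStr_eq]
  cases h : x.find? (fun p => p.1 == "explore_ref") <;> simp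

-- ===== VERDICT (by name: the statement is the Claim_ definition above) =====
theorem journal_explore_links_from_rows_py_spec : Claim_equal_journal_explore_links_from_rows_py := by
  intro rows _
  unfold Spec_journal_explore_links_from_rows_py
  show (PySem.List.sorted2 (rows.foldl pvStepA PySem.Dict.empty).values pvKey1 pvKey2).map pvFmt
      = journal_explore_links_from_rows_py_alt rows
  have hA : rows.foldl pvStepA PySem.Dict.empty = pvS rows := by
    have h1 := pvFold_spec rows []
    rw [List.nil_append] at h1
    exact h1
  have hVals : (pvS rows).values = (pvErs rows).map (pvRep rows) := by
    simp [pvS, PySem.Dict.values, List.map_map, Function.comp]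
  have hPass : altPass rows PySem.Dict.empty PySem.Dict.empty = (pvFS rows, pvDR rows) := by
    have h2 := altPass_spec rows []
    rw [List.nil_append] at h2
    exact h2
  have hBody : journal_explore_links_from_rows_py_alt rows
      = ([0, 1, 2, 3, 4, 5, 6, 7, 99] : List Int).flatMap (fun rank =>
          (PySem.List.sorted
            (((pvFS rows).items.map (fun p =>
                match (pvDR rows).get? p.1 with
                | some d => d
                | none => p.2)).filter (fun x => altRank x = rank)) altName).map altFmt) := by
    unfold journal_explore_links_from_rows_py_alt
    rw [hPass]
  have hR : altRank = pvKey1 := funext altRank_eq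
  have hN : altName = pvKey2 := funext altName_eq
  have hF : altFmt = pvFmt := funext altFmt_eq
  rw [hA, hVals, hBody, pvReps_eq, hR, hN, hF, ← List.map_flatMap]
  exact congrArg (List.map pvFmt)
    (pvSorted2_flatMap pvKey1 pvKey2 [0, 1, 2, 3, 4, 5, 6, 7, 99] (by decide)
      ((pvErs rows).map (pvRep rows)) (fun x _ => pvKey1_mem x))
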